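-- pv_equiv track=rewrite | github.com/AZHSQ/Test | IE_master/encryption/process.py | arnold_encode
-- ===== SOURCE A (Python) =====
-- def arnold_encode(matrix, a, b, iterations):
--     width = len(matrix)
--     height = len(matrix[0])
--     N = len(matrix[0])
--     for _ in range(iterations):
--         new_matrix = [[0] * N for _ in range(N)]
--         for x in range(width):
--             for y in range(height):
--                 new_x = (x + b * y) % N
--                 new_y = ((a * x) + (a * b * y) + y) % N
--                 new_matrix[new_x][new_y] = matrix[x][y]
--         matrix = new_matrix
--     return matrix
-- ===== SOURCE B (Python) =====
-- def arnold_encode(matrix, a, b, iterations):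
--     if iterations <= 0:
--         return matrix
--     width = len(matrix)
--     N = len(matrix[0])
--     # One Arnold step moves (x, y) to M @ (x, y) mod N with M = [[1, b], [a, a*b + 1]].
--     # Compute M**iterations mod N by square-and-multiply, then place each cell once.
--     p, q, r, s = 1, 0, 0, 1
--     mp, mq, mr, ms = 1 % N, b % N, a % N, (a * b + 1) % N
--     e = iterations
--     while e:
--         if e & 1:
--             p, q, r, s = (p * mp + q * mr) % N, (p * mq + q * ms) % N, \
--                          (r * mp + s * mr) % N, (r * mq + s * ms) % N
--         mp, mq, mr, ms = (mp * mp + mq * mr) % N, (mp * mq + mq * ms) % N, \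
--                          (mr * mp + ms * mr) % N, (mr * mq + ms * ms) % N
--         e >>= 1
--     out = [[0] * N for _ in range(N)]
--     for x in range(width):
--         row = matrix[x]
--         for y in range(N):
--             out[(p * x + q * y) % N][(r * x + s * y) % N] = row[y]
--     return out
-- ===== Notes on version B (the rewrite author's own statement) =====
-- stated objective: faster
-- what changed: B replaces the per-iteration O(N^2) rescatter loop by square-and-multiply exponentiation of the 2x2 Arnold map matrix mod N, followed by a single placement pass (plus an early return for iterations <= 0).
-- outside the precondition, e.g. on arnold_encode([[]], 0, 0, 1): A returns [], B raises ZeroDivisionError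
import Mathlib
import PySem

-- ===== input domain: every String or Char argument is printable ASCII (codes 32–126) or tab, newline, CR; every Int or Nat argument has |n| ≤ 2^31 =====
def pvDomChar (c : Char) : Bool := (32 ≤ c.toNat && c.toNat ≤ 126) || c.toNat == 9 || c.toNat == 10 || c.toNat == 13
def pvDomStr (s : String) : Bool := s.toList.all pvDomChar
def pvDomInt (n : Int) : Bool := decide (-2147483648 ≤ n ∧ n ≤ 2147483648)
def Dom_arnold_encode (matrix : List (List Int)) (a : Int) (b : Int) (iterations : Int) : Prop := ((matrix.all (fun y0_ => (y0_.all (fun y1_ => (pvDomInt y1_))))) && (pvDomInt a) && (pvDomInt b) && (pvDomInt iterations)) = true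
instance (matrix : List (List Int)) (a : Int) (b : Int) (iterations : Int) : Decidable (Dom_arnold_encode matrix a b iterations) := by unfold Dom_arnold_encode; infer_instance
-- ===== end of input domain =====

-- B replaces A's per-iteration rescatter loop by square-and-multiply exponentiation of the
-- 2x2 Arnold map matrix mod N followed by one placement pass (objective: faster).

-- ===== PORT A =====
-- new_matrix[i][j] = v; in both programs i and j come from '% N' with N ≥ 1, hence lie in
-- [0, N) and toNat is exact (Python would raise only out of range, which cannot happen here)
def pvSetCell (m : List (List Int)) (i j : Int) (v : Int) : List (List Int) :=
  m.set i.toNat ((m.getD i.toNat []).set j.toNat v)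

-- one pass of A's loop body ('for x in range(width): for y in range(height): …')
def pvStepA (m : List (List Int)) (a b : Int) (N width height : Nat) : List (List Int) :=
  (List.range width).foldl (fun nm (x : Nat) =>
    (List.range height).foldl (fun nm (y : Nat) =>
      pvSetCell nm (PySem.Int.mod ((x : Int) + b * (y : Int)) (N : Int))
                   (PySem.Int.mod ((a * (x : Int)) + (a * b * (y : Int)) + (y : Int)) (N : Int))
                   ((m.getD x []).getD y 0)) nm)
    (List.replicate N (List.replicate N 0))

def arnold_encode (matrix : List (List Int)) (a : Int) (b : Int) (iterations : Int) : List (List Int) :=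
  let width := matrix.length
  let height := (matrix.headD []).length   -- len(matrix[0]); raises on [], excluded by Pre_
  let N := height
  (List.range iterations.toNat).foldl (fun m _ => pvStepA m a b N width height) matrix

-- ===== PORT B =====
structure Mat2 where
  p : Int
  q : Int
  r : Int
  s : Int
deriving DecidableEq, Repr

-- (p*mp + q*mr) % N, … : one 2x2 matrix product with entries reduced mod N
def pvMulMod (X Y : Mat2) (N : Int) : Mat2 :=
  ⟨PySem.Int.mod (X.p * Y.p + X.q * Y.r) N, PySem.Int.mod (X.p * Y.q + X.q * Y.s) N,
   PySem.Int.mod (X.r * Y.p + X.s * Y.r) N, PySem.Int.mod (X.r * Y.q + X.s * Y.s) N⟩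

-- Source B's 'while e: if e & 1: acc = acc*m; m = m*m; e >>= 1'
def pvPowLoop (acc m : Mat2) (N : Int) (e : Nat) : Mat2 :=
  if h : e = 0 then acc
  else pvPowLoop (if e % 2 = 1 then pvMulMod acc m N else acc) (pvMulMod m m N) N (e / 2)
termination_by e
decreasing_by exact Nat.div_lt_self (Nat.pos_of_ne_zero h) one_lt_two

def arnold_encode_alt (matrix : List (List Int)) (a : Int) (b : Int) (iterations : Int) : List (List Int) :=
  if iterations ≤ 0 then matrix
  else
    let width := matrix.length
    let N := (matrix.headD []).length   -- len(matrix[0]); raises on [], excluded by Pre_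
    -- e runs over the bits of iterations (> 0 here), i.e. of iterations.toNat
    let P := pvPowLoop ⟨1, 0, 0, 1⟩
               ⟨PySem.Int.mod 1 (N : Int), PySem.Int.mod b (N : Int),
                PySem.Int.mod a (N : Int), PySem.Int.mod (a * b + 1) (N : Int)⟩
               (N : Int) iterations.toNat
    (List.range width).foldl (fun out (x : Nat) =>
      let row := matrix.getD x []
      (List.range N).foldl (fun out (y : Nat) =>
        pvSetCell out (PySem.Int.mod (P.p * (x : Int) + P.q * (y : Int)) (N : Int))
                      (PySem.Int.mod (P.r * (x : Int) + P.s * (y : Int)) (N : Int))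
                      (row.getD y 0)) out) (List.replicate N (List.replicate N 0))

-- ===== PRECONDITION & SPEC =====
-- Pre_ excludes the empty matrix (A raises IndexError on len(matrix[0])), matrices whose rows
-- are shorter than row 0 (A raises IndexError reading matrix[x][y]) and, for two or more
-- iterations, non-square matrices, on which A raises IndexError at the second iteration
-- (width > N) or returns values that are accidents of reusing the original width against the
-- new N×N buffer (rows of stale zeros); for one or more iterations it also excludes a
-- zero-width row 0, where A returns an accidental [] and B raises ZeroDivisionError on % N.
def Pre_arnold_encode (matrix : List (List Int)) (a : Int) (b : Int) (iterations : Int) : Prop :=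
  matrix ≠ [] ∧
    (iterations ≤ 0 ∨
      ((∀ r ∈ matrix, (matrix.headD []).length ≤ r.length) ∧
        1 ≤ (matrix.headD []).length ∧
        (iterations = 1 ∨ matrix.length = (matrix.headD []).length)))
instance (matrix : List (List Int)) (a : Int) (b : Int) (iterations : Int) : Decidable (Pre_arnold_encode matrix a b iterations) := by unfold Pre_arnold_encode; infer_instance

def pvWitness_arnold_encode : List (List Int) × Int × Int × Int := ([[1, 2], [3, 4]], 1, 1, 2)

def Spec_arnold_encode (matrix : List (List Int)) (a : Int) (b : Int) (iterations : Int) (out : List (List Int)) : Prop := out = arnold_encode_alt matrix a b iterations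
instance (matrix : List (List Int)) (a : Int) (b : Int) (iterations : Int) (out : List (List Int)) : Decidable (Spec_arnold_encode matrix a b iterations out) := by unfold Spec_arnold_encode; infer_instance

-- ===== CLAIM (what is proved, stated in full; the proofs are below) =====
def Claim_equal_arnold_encode : Prop := ∀ (matrix : List (List Int)) (a : Int) (b : Int) (iterations : Int), Dom_arnold_encode matrix a b iterations → Pre_arnold_encode matrix a b iterations → Spec_arnold_encode matrix a b iterations (arnold_encode matrix a b iterations)

-- ===== LEMMAS AND PROOFS =====

-- 2x2 integer matrix algebra
def mmul (X Y : Mat2) : Mat2 :=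
  ⟨X.p * Y.p + X.q * Y.r, X.p * Y.q + X.q * Y.s, X.r * Y.p + X.s * Y.r, X.r * Y.q + X.s * Y.s⟩

def midM : Mat2 := ⟨1, 0, 0, 1⟩

def mpow (M : Mat2) : Nat → Mat2
  | 0 => midM
  | n + 1 => mmul (mpow M n) M

def madj (M : Mat2) : Mat2 := ⟨M.s, -M.q, -M.r, M.p⟩

def mdet (M : Mat2) : Int := M.p * M.s - M.q * M.r

-- entrywise congruence mod n
def mEq (n : Int) (X Y : Mat2) : Prop :=
  X.p ≡ Y.p [ZMOD n] ∧ X.q ≡ Y.q [ZMOD n] ∧ X.r ≡ Y.r [ZMOD n] ∧ X.s ≡ Y.s [ZMOD n]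

theorem mEq_refl (n : Int) (X : Mat2) : mEq n X X := ⟨Int.ModEq.refl _, Int.ModEq.refl _, Int.ModEq.refl _, Int.ModEq.refl _⟩

theorem mEq_trans {n : Int} {X Y Z : Mat2} (h : mEq n X Y) (h' : mEq n Y Z) : mEq n X Z :=
  ⟨h.1.trans h'.1, h.2.1.trans h'.2.1, h.2.2.1.trans h'.2.2.1, h.2.2.2.trans h'.2.2.2⟩

theorem mEq_mmul {n : Int} {X X' Y Y' : Mat2} (hx : mEq n X X') (hy : mEq n Y Y') :
    mEq n (mmul X Y) (mmul X' Y') := by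
  obtain ⟨h1, h2, h3, h4⟩ := hx
  obtain ⟨g1, g2, g3, g4⟩ := hy
  exact ⟨(h1.mul g1).add (h2.mul g3), (h1.mul g2).add (h2.mul g4),
         (h3.mul g1).add (h4.mul g3), (h3.mul g2).add (h4.mul g4)⟩

theorem mmul_assoc (X Y Z : Mat2) : mmul (mmul X Y) Z = mmul X (mmul Y Z) := by
  simp only [mmul, Mat2.mk.injEq]; refine ⟨by ring, by ring, by ring, by ring⟩

theorem mmul_id_left (X : Mat2) : mmul midM X = X := by
  cases X; simp [mmul, midM]

theorem mmul_id_right (X : Mat2) : mmul X midM = X := by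
  cases X; simp [mmul, midM]

theorem mpow_add (M : Mat2) (s t : Nat) : mpow M (s + t) = mmul (mpow M s) (mpow M t) := by
  induction t with
  | zero => simp [mpow, mmul_id_right]
  | succ t ih => rw [← Nat.add_assoc, mpow, mpow, ih, mmul_assoc]

theorem mmul_mpow_comm (M : Mat2) (t : Nat) : mmul M (mpow M t) = mmul (mpow M t) M := by
  have h1 : mpow M 1 = M := by simp [mpow, mmul_id_left]
  have := mpow_add M 1 t
  rw [h1] at this
  have h2 := mpow_add M t 1
  rw [h1] at h2
  rw [← this, ← h2, Nat.add_comm]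

theorem mdet_mmul (X Y : Mat2) : mdet (mmul X Y) = mdet X * mdet Y := by
  simp only [mdet, mmul]; ring

theorem madj_mmul (X Y : Mat2) : madj (mmul X Y) = mmul (madj Y) (madj X) := by
  simp only [madj, mmul, Mat2.mk.injEq]; refine ⟨by ring, by ring, by ring, by ring⟩

theorem madj_mpow (M : Mat2) (k : Nat) : madj (mpow M k) = mpow (madj M) k := by
  induction k with
  | zero => simp [mpow, madj, midM]
  | succ k ih => rw [mpow, madj_mmul, ih, mmul_mpow_comm, mpow]

theorem mmul_madj (X : Mat2) : mmul X (madj X) = ⟨mdet X, 0, 0, mdet X⟩ := by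
  simp only [mmul, madj, mdet, Mat2.mk.injEq]; refine ⟨by ring, by ring, by ring, by ring⟩

theorem madj_mmul_self (X : Mat2) : mmul (madj X) X = ⟨mdet X, 0, 0, mdet X⟩ := by
  simp only [mmul, madj, mdet, Mat2.mk.injEq]; refine ⟨by ring, by ring, by ring, by ring⟩

-- pvMulMod is mmul with entries reduced mod N
theorem pvMulMod_mEq {N : Int} (hN : 0 < N) (X Y : Mat2) : mEq N (pvMulMod X Y N) (mmul X Y) := by
  simp only [pvMulMod, mmul, PySem.Int.mod_eq_emod_of_pos hN]
  exact ⟨Int.emod_emod_of_dvd _ dvd_rfl, Int.emod_emod_of_dvd _ dvd_rfl,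
         Int.emod_emod_of_dvd _ dvd_rfl, Int.emod_emod_of_dvd _ dvd_rfl⟩

theorem mpow_sq (M : Mat2) (t : Nat) : mpow (mmul M M) t = mpow M (2 * t) := by
  induction t with
  | zero => rfl
  | succ t ih =>
      rw [mpow, ih, show 2 * (t + 1) = 2 * t + 1 + 1 from by ring, mpow, mpow, mmul_assoc]

-- square-and-multiply computes the naive power (mod N)
theorem pvPowLoop_mEq {N : Int} (hN : 0 < N) :
    ∀ (e : Nat) (acc m acc' m' : Mat2), mEq N acc acc' → mEq N m m' →
      mEq N (pvPowLoop acc m N e) (mmul acc' (mpow m' e)) := by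
  intro e
  induction e using Nat.strong_induction_on with
  | _ e ih =>
    intro acc m acc' m' ha hm
    rcases Nat.eq_zero_or_pos e with h0 | hpos
    · subst h0
      rw [pvPowLoop]
      simpa [mpow, mmul_id_right] using ha
    · have hne : e ≠ 0 := Nat.pos_iff_ne_zero.mp hpos
      rw [pvPowLoop, dif_neg hne]
      have hlt : e / 2 < e := Nat.div_lt_self hpos one_lt_two
      have ha2 : mEq N (if e % 2 = 1 then pvMulMod acc m N else acc)
          (if e % 2 = 1 then mmul acc' m' else acc') := by
        split_ifs with hp
        · exact mEq_trans (pvMulMod_mEq hN acc m) (mEq_mmul ha hm)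
        · exact ha
      have hm2 : mEq N (pvMulMod m m N) (mmul m' m') :=
        mEq_trans (pvMulMod_mEq hN m m) (mEq_mmul hm hm)
      refine mEq_trans (ih (e / 2) hlt _ _ _ _ ha2 hm2) ?_
      rw [mpow_sq]
      rcases Nat.mod_two_eq_zero_or_one e with hm0 | hm1
      · rw [if_neg (by omega)]
        rw [show 2 * (e / 2) = e from by omega]
        exact mEq_refl _ _
      · rw [if_pos hm1]
        have he : mpow m' e = mmul (mpow m' (2 * (e / 2))) m' := by
          conv_lhs => rw [show e = 2 * (e / 2) + 1 from by omega]
          simp [mpow]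
        rw [he, mmul_assoc, ← mmul_mpow_comm]
        exact mEq_refl _ _

-- ======= grid machinery =======

def g2 (m : List (List Int)) (i j : Nat) : Int := (m.getD i []).getD j 0

def pvShape (N : Nat) (m : List (List Int)) : Prop := m.length = N ∧ ∀ r ∈ m, r.length = N

def setCellN (m : List (List Int)) (i j : Nat) (v : Int) : List (List Int) :=
  m.set i ((m.getD i []).set j v)

def pvApplyW (init : List (List Int)) (ws : List ((Nat × Nat) × Int)) : List (List Int) :=
  ws.foldl (fun acc w => setCellN acc w.1.1 w.1.2 w.2) init

-- the (row, col) cell a linear map sends (x, y) to, mod N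
def pvLin (M : Mat2) (N : Nat) (x y : Nat) : Nat × Nat :=
  (((M.p * (x : Int) + M.q * (y : Int)) % (N : Int)).toNat,
   ((M.r * (x : Int) + M.s * (y : Int)) % (N : Int)).toNat)

def pvScatter (M : Mat2) (N width height : Nat) (m : List (List Int)) : List (List Int) :=
  pvApplyW (List.replicate N (List.replicate N 0))
    ((List.range width).flatMap (fun x => (List.range height).map (fun y => (pvLin M N x y, g2 m x y))))

def pvGather (G : Mat2) (N : Nat) (m : List (List Int)) : List (List Int) :=
  (List.range N).map (fun i => (List.range N).map (fun j => g2 m (pvLin G N i j).1 (pvLin G N i j).2))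

theorem shape_setCellN {N : Nat} {m : List (List Int)} (h : pvShape N m) (i j : Nat) (v : Int) :
    pvShape N (setCellN m i j v) := by
  obtain ⟨hl, hr⟩ := h
  by_cases hi : i < m.length
  · refine ⟨by simp [setCellN, hl], ?_⟩
    intro r hrm
    rcases List.mem_or_eq_of_mem_set hrm with hmem | heq
    · exact hr r hmem
    · subst heq
      rw [List.length_set, List.getD_eq_getElem?_getD, List.getElem?_eq_getElem hi]
      exact hr _ (List.getElem_mem hi)
  · rw [setCellN, List.set_eq_of_length_le (Nat.le_of_not_lt hi)]
    exact ⟨hl, hr⟩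

theorem shape_pvApplyW {N : Nat} {init : List (List Int)} (h : pvShape N init)
    (ws : List ((Nat × Nat) × Int)) : pvShape N (pvApplyW init ws) := by
  induction ws generalizing init with
  | nil => exact h
  | cons w ws ih => exact ih (shape_setCellN h w.1.1 w.1.2 w.2)

theorem g2_setCellN_same {N : Nat} {m : List (List Int)} (h : pvShape N m) {i j : Nat}
    (hi : i < N) (hj : j < N) (v : Int) : g2 (setCellN m i j v) i j = v := by
  obtain ⟨hl, hr⟩ := h
  have hi' : i < m.length := by omega
  have hrow : (m[i]?.getD []).length = N := by
    rw [List.getElem?_eq_getElem hi']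
    exact hr _ (List.getElem_mem hi')
  unfold g2 setCellN
  simp only [List.getD_eq_getElem?_getD]
  rw [List.getElem?_set_self hi']
  simp only [Option.getD_some]
  rw [List.getElem?_set_self (show j < (m[i]?.getD []).length by omega)]
  rfl

theorem g2_setCellN_other {m : List (List Int)} {i j i' j' : Nat}
    (hne : i ≠ i' ∨ j ≠ j') (v : Int) : g2 (setCellN m i j v) i' j' = g2 m i' j' := by
  unfold g2 setCellN
  simp only [List.getD_eq_getElem?_getD]
  by_cases hii : i = i'
  · subst hii
    have hjj : j ≠ j' := hne.resolve_left (by simp)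
    by_cases hi : i < m.length
    · rw [List.getElem?_set_self hi]
      simp only [Option.getD_some]
      rw [List.getElem?_set_ne hjj]
    · rw [List.set_eq_of_length_le (Nat.le_of_not_lt hi)]
  · rw [List.getElem?_set_ne hii]

theorem g2_pvApplyW {N : Nat} (ws : List ((Nat × Nat) × Int)) (init : List (List Int))
    (hsh : pvShape N init) {i j : Nat} (hi : i < N) (hj : j < N) :
    g2 (pvApplyW init ws) i j =
      (match ws.reverse.find? (fun w => w.1.1 == i && w.1.2 == j) with
       | some w => w.2
       | none => g2 init i j) := by
  induction ws generalizing init with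
  | nil => simp [pvApplyW]
  | cons w ws ih =>
      have hstep : pvApplyW init (w :: ws) = pvApplyW (setCellN init w.1.1 w.1.2 w.2) ws := rfl
      rw [hstep, ih _ (shape_setCellN hsh w.1.1 w.1.2 w.2),
        show (w :: ws).reverse = ws.reverse ++ [w] from by simp, List.find?_append]
      cases hf : ws.reverse.find? (fun w => w.1.1 == i && w.1.2 == j) with
      | some u => simp
      | none =>
          simp only [Option.none_or]
          by_cases hp : (w.1.1 == i && w.1.2 == j) = true
          · simp only [List.find?, hp]
            simp only [Bool.and_eq_true, beq_iff_eq] at hp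
            obtain ⟨h1, h2⟩ := hp
            subst h1; subst h2
            exact g2_setCellN_same hsh hi hj w.2
          · simp only [List.find?, hp]
            simp only [Bool.not_eq_true, Bool.and_eq_false_iff, beq_eq_false_iff_ne] at hp
            refine g2_setCellN_other ?_ w.2
            rcases hp with h | h
            · exact Or.inl h
            · exact Or.inr h

theorem eq_of_shape_g2 {N : Nat} {m m' : List (List Int)} (h : pvShape N m) (h' : pvShape N m')
    (hg : ∀ i < N, ∀ j < N, g2 m i j = g2 m' i j) : m = m' := by
  obtain ⟨hl, hr⟩ := h; obtain ⟨hl', hr'⟩ := h'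
  apply List.ext_getElem (by omega)
  intro i hi1 hi2
  have hri : m[i].length = N := hr _ (List.getElem_mem hi1)
  have hri' : m'[i].length = N := hr' _ (List.getElem_mem hi2)
  apply List.ext_getElem (by omega)
  intro j hj1 hj2
  have e1 : g2 m i j = m[i][j] := by
    unfold g2
    simp only [List.getD_eq_getElem?_getD, List.getElem?_eq_getElem hi1, Option.getD_some,
      List.getElem?_eq_getElem hj1]
  have e2 : g2 m' i j = m'[i][j] := by
    unfold g2
    simp only [List.getD_eq_getElem?_getD, List.getElem?_eq_getElem hi2, Option.getD_some,
      List.getElem?_eq_getElem hj2]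
  rw [← e1, ← e2]
  exact hg i (by omega) j (by omega)

theorem pvLin_lt {N : Nat} (hN : 0 < N) (M : Mat2) (x y : Nat) :
    (pvLin M N x y).1 < N ∧ (pvLin M N x y).2 < N := by
  have hN' : (0 : Int) < (N : Int) := by exact_mod_cast hN
  have hNne : (N : Int) ≠ 0 := by omega
  unfold pvLin
  constructor
  · have h1 := Int.emod_nonneg (M.p * (x : Int) + M.q * (y : Int)) hNne
    have h2 := Int.emod_lt_of_pos (M.p * (x : Int) + M.q * (y : Int)) hN'
    omega
  · have h1 := Int.emod_nonneg (M.r * (x : Int) + M.s * (y : Int)) hNne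
    have h2 := Int.emod_lt_of_pos (M.r * (x : Int) + M.s * (y : Int)) hN'
    omega

theorem pvLin_pvLin {N : Nat} (hN : 0 < N) {M G : Mat2}
    (h : mEq (N : Int) (mmul G M) midM) (x y : Nat) (hx : x < N) (hy : y < N) :
    pvLin G N (pvLin M N x y).1 (pvLin M N x y).2 = (x, y) := by
  have hN' : (0 : Int) < (N : Int) := by exact_mod_cast hN
  have hNne : (N : Int) ≠ 0 := by omega
  simp only [mEq, mmul, midM] at h
  obtain ⟨h1, h2, h3, h4⟩ := h
  unfold pvLin
  simp only
  have hu0 : 0 ≤ (M.p * (x : Int) + M.q * (y : Int)) % (N : Int) := Int.emod_nonneg _ hNne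
  have hv0 : 0 ≤ (M.r * (x : Int) + M.s * (y : Int)) % (N : Int) := Int.emod_nonneg _ hNne
  rw [Int.toNat_of_nonneg hu0, Int.toNat_of_nonneg hv0]
  have hucong : (M.p * (x : Int) + M.q * (y : Int)) % (N : Int)
      ≡ M.p * (x : Int) + M.q * (y : Int) [ZMOD (N : Int)] := Int.emod_emod_of_dvd _ dvd_rfl
  have hvcong : (M.r * (x : Int) + M.s * (y : Int)) % (N : Int)
      ≡ M.r * (x : Int) + M.s * (y : Int) [ZMOD (N : Int)] := Int.emod_emod_of_dvd _ dvd_rfl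
  have hXcong : G.p * ((M.p * (x : Int) + M.q * (y : Int)) % (N : Int))
      + G.q * ((M.r * (x : Int) + M.s * (y : Int)) % (N : Int)) ≡ (x : Int) [ZMOD (N : Int)] := by
    calc G.p * ((M.p * (x : Int) + M.q * (y : Int)) % (N : Int))
        + G.q * ((M.r * (x : Int) + M.s * (y : Int)) % (N : Int))
        ≡ G.p * (M.p * (x : Int) + M.q * (y : Int))
          + G.q * (M.r * (x : Int) + M.s * (y : Int)) [ZMOD (N : Int)] :=
          (hucong.mul_left G.p).add (hvcong.mul_left G.q)
      _ = (G.p * M.p + G.q * M.r) * (x : Int) + (G.p * M.q + G.q * M.s) * (y : Int) := by ring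
      _ ≡ 1 * (x : Int) + 0 * (y : Int) [ZMOD (N : Int)] := (h1.mul_right _).add (h2.mul_right _)
      _ = (x : Int) := by ring
  have hYcong : G.r * ((M.p * (x : Int) + M.q * (y : Int)) % (N : Int))
      + G.s * ((M.r * (x : Int) + M.s * (y : Int)) % (N : Int)) ≡ (y : Int) [ZMOD (N : Int)] := by
    calc G.r * ((M.p * (x : Int) + M.q * (y : Int)) % (N : Int))
        + G.s * ((M.r * (x : Int) + M.s * (y : Int)) % (N : Int))
        ≡ G.r * (M.p * (x : Int) + M.q * (y : Int))
          + G.s * (M.r * (x : Int) + M.s * (y : Int)) [ZMOD (N : Int)] :=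
          (hucong.mul_left G.r).add (hvcong.mul_left G.s)
      _ = (G.r * M.p + G.s * M.r) * (x : Int) + (G.r * M.q + G.s * M.s) * (y : Int) := by ring
      _ ≡ 0 * (x : Int) + 1 * (y : Int) [ZMOD (N : Int)] := (h3.mul_right _).add (h4.mul_right _)
      _ = (y : Int) := by ring
  have hxmod : (x : Int) % (N : Int) = (x : Int) :=
    Int.emod_eq_of_lt (by positivity) (by exact_mod_cast hx)
  have hymod : (y : Int) % (N : Int) = (y : Int) :=
    Int.emod_eq_of_lt (by positivity) (by exact_mod_cast hy)
  have hX : (G.p * ((M.p * (x : Int) + M.q * (y : Int)) % (N : Int))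
      + G.q * ((M.r * (x : Int) + M.s * (y : Int)) % (N : Int))) % (N : Int) = (x : Int) := by
    have := hXcong
    unfold Int.ModEq at this
    rw [this, hxmod]
  have hY : (G.r * ((M.p * (x : Int) + M.q * (y : Int)) % (N : Int))
      + G.s * ((M.r * (x : Int) + M.s * (y : Int)) % (N : Int))) % (N : Int) = (y : Int) := by
    have := hYcong
    unfold Int.ModEq at this
    rw [this, hymod]
  rw [hX, hY]
  simp

theorem pvLin_congr {N : Nat} {M M' : Mat2} (h : mEq (N : Int) M M') (x y : Nat) :
    pvLin M N x y = pvLin M' N x y := by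
  obtain ⟨h1, h2, h3, h4⟩ := h
  unfold pvLin
  have e1 : (M.p * (x : Int) + M.q * (y : Int)) % (N : Int)
      = (M'.p * (x : Int) + M'.q * (y : Int)) % (N : Int) := (h1.mul_right _).add (h2.mul_right _)
  have e2 : (M.r * (x : Int) + M.s * (y : Int)) % (N : Int)
      = (M'.r * (x : Int) + M'.s * (y : Int)) % (N : Int) := (h3.mul_right _).add (h4.mul_right _)
  rw [e1, e2]

theorem pvLin_comp {N : Nat} (hN : 0 < N) (G G' : Mat2) (i j : Nat) :
    pvLin G' N (pvLin G N i j).1 (pvLin G N i j).2 = pvLin (mmul G' G) N i j := by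
  have hNne : (N : Int) ≠ 0 := by
    have : (0 : Int) < (N : Int) := by exact_mod_cast hN
    omega
  unfold pvLin mmul
  simp only
  have hu0 : 0 ≤ (G.p * (i : Int) + G.q * (j : Int)) % (N : Int) := Int.emod_nonneg _ hNne
  have hv0 : 0 ≤ (G.r * (i : Int) + G.s * (j : Int)) % (N : Int) := Int.emod_nonneg _ hNne
  rw [Int.toNat_of_nonneg hu0, Int.toNat_of_nonneg hv0]
  have hucong : (G.p * (i : Int) + G.q * (j : Int)) % (N : Int)
      ≡ G.p * (i : Int) + G.q * (j : Int) [ZMOD (N : Int)] := Int.emod_emod_of_dvd _ dvd_rfl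
  have hvcong : (G.r * (i : Int) + G.s * (j : Int)) % (N : Int)
      ≡ G.r * (i : Int) + G.s * (j : Int) [ZMOD (N : Int)] := Int.emod_emod_of_dvd _ dvd_rfl
  have e1 : G'.p * ((G.p * (i : Int) + G.q * (j : Int)) % (N : Int))
      + G'.q * ((G.r * (i : Int) + G.s * (j : Int)) % (N : Int))
      ≡ (G'.p * G.p + G'.q * G.r) * (i : Int) + (G'.p * G.q + G'.q * G.s) * (j : Int)
        [ZMOD (N : Int)] := by
    calc G'.p * ((G.p * (i : Int) + G.q * (j : Int)) % (N : Int))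
        + G'.q * ((G.r * (i : Int) + G.s * (j : Int)) % (N : Int))
        ≡ G'.p * (G.p * (i : Int) + G.q * (j : Int))
          + G'.q * (G.r * (i : Int) + G.s * (j : Int)) [ZMOD (N : Int)] :=
          (hucong.mul_left G'.p).add (hvcong.mul_left G'.q)
      _ = (G'.p * G.p + G'.q * G.r) * (i : Int) + (G'.p * G.q + G'.q * G.s) * (j : Int) := by ring
  have e2 : G'.r * ((G.p * (i : Int) + G.q * (j : Int)) % (N : Int))
      + G'.s * ((G.r * (i : Int) + G.s * (j : Int)) % (N : Int))
      ≡ (G'.r * G.p + G'.s * G.r) * (i : Int) + (G'.r * G.q + G'.s * G.s) * (j : Int)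
        [ZMOD (N : Int)] := by
    calc G'.r * ((G.p * (i : Int) + G.q * (j : Int)) % (N : Int))
        + G'.s * ((G.r * (i : Int) + G.s * (j : Int)) % (N : Int))
        ≡ G'.r * (G.p * (i : Int) + G.q * (j : Int))
          + G'.s * (G.r * (i : Int) + G.s * (j : Int)) [ZMOD (N : Int)] :=
          (hucong.mul_left G'.r).add (hvcong.mul_left G'.s)
      _ = (G'.r * G.p + G'.s * G.r) * (i : Int) + (G'.r * G.q + G'.s * G.s) * (j : Int) := by ring
  unfold Int.ModEq at e1 e2
  rw [e1, e2]

theorem shape_pvGather {N : Nat} (G : Mat2) (m : List (List Int)) : pvShape N (pvGather G N m) := by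
  refine ⟨by simp [pvGather], ?_⟩
  intro r h
  simp only [pvGather, List.mem_map, List.mem_range] at h
  obtain ⟨i, _, rfl⟩ := h
  simp

theorem g2_pvGather {N : Nat} (G : Mat2) (m : List (List Int)) {i j : Nat}
    (hi : i < N) (hj : j < N) :
    g2 (pvGather G N m) i j = g2 m (pvLin G N i j).1 (pvLin G N i j).2 := by
  unfold pvGather g2
  rw [PySem.List.getD_map_range _ _ _ _ hi, PySem.List.getD_map_range _ _ _ _ hj]

theorem pvGather_comp {N : Nat} (hN : 0 < N) (G G' : Mat2) (m : List (List Int)) :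
    pvGather G N (pvGather G' N m) = pvGather (mmul G' G) N m := by
  refine eq_of_shape_g2 (shape_pvGather G _) (shape_pvGather (mmul G' G) m) ?_
  intro i hi j hj
  have hlt := pvLin_lt hN G i j
  rw [g2_pvGather G _ hi hj, g2_pvGather (mmul G' G) m hi hj,
    g2_pvGather G' m hlt.1 hlt.2, pvLin_comp hN]

theorem pvGather_congr {N : Nat} {G G' : Mat2} (h : mEq (N : Int) G G') (m : List (List Int)) :
    pvGather G N m = pvGather G' N m := by
  unfold pvGather
  apply List.map_congr_left
  intro i _
  apply List.map_congr_left
  intro j _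
  rw [pvLin_congr h]

theorem pvScatter_congr {N : Nat} {M M' : Mat2} (h : mEq (N : Int) M M') (w hgt : Nat)
    (m : List (List Int)) : pvScatter M N w hgt m = pvScatter M' N w hgt m := by
  unfold pvScatter
  simp only [pvLin_congr h]

theorem shape_replicate (N : Nat) : pvShape N (List.replicate N (List.replicate N (0 : Int))) := by
  refine ⟨by simp, ?_⟩
  intro r h
  rw [List.eq_of_mem_replicate h]
  simp

-- the central lemma: a scatter by M over the full square equals a gather by any mod-N inverse G
theorem pvScatter_eq_pvGather {N : Nat} (hN : 0 < N) {M G : Mat2}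
    (hMG : mEq (N : Int) (mmul M G) midM) (hGM : mEq (N : Int) (mmul G M) midM)
    (m : List (List Int)) :
    pvScatter M N N N m = pvGather G N m := by
  refine eq_of_shape_g2 (shape_pvApplyW (shape_replicate N) _) (shape_pvGather G m) ?_
  intro i hi j hj
  rw [show pvScatter M N N N m = pvApplyW (List.replicate N (List.replicate N 0))
    ((List.range N).flatMap (fun x => (List.range N).map (fun y => (pvLin M N x y, g2 m x y))))
    from rfl]
  rw [g2_pvApplyW _ _ (shape_replicate N) hi hj, g2_pvGather G m hi hj]
  have hg := pvLin_lt hN G i j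
  have hfix : pvLin M N (pvLin G N i j).1 (pvLin G N i j).2 = (i, j) :=
    pvLin_pvLin hN hMG i j hi hj
  have hmem : (pvLin M N (pvLin G N i j).1 (pvLin G N i j).2,
      g2 m (pvLin G N i j).1 (pvLin G N i j).2)
      ∈ (List.range N).flatMap (fun x => (List.range N).map (fun y => (pvLin M N x y, g2 m x y))) := by
    simp only [List.mem_flatMap, List.mem_map, List.mem_range]
    exact ⟨(pvLin G N i j).1, hg.1, (pvLin G N i j).2, hg.2, rfl⟩
  have hex : ∃ w ∈ ((List.range N).flatMap
      (fun x => (List.range N).map (fun y => (pvLin M N x y, g2 m x y)))).reverse,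
      (fun w => w.1.1 == i && w.1.2 == j) w = true := by
    refine ⟨_, List.mem_reverse.mpr hmem, ?_⟩
    simp [hfix]
  obtain ⟨u, hu⟩ := Option.isSome_iff_exists.mp (List.find?_isSome.mpr hex)
  rw [hu]
  have humem := List.mem_reverse.mp (List.mem_of_find?_eq_some hu)
  have hup := List.find?_some hu
  simp only [List.mem_flatMap, List.mem_map, List.mem_range] at humem
  obtain ⟨x, hxN, y, hyN, rfl⟩ := humem
  simp only [Bool.and_eq_true, beq_iff_eq] at hup
  have hkey : pvLin M N x y = (i, j) := Prod.ext hup.1 hup.2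
  have hback := pvLin_pvLin hN hGM x y hxN hyN
  rw [hkey] at hback
  simp only at hback
  simp [hback]

-- the ports' nested write loops are pvScatter
theorem pvStepA_eq_pvScatter (m : List (List Int)) (a b : Int) (N w : Nat) (hN : 0 < N) :
    pvStepA m a b N w N = pvScatter ⟨1, b, a, a * b + 1⟩ N w N m := by
  have hN' : (0 : Int) < (N : Int) := by exact_mod_cast hN
  unfold pvStepA pvScatter pvApplyW
  rw [List.foldl_flatMap]
  congr 1
  funext nm x
  rw [List.foldl_map]
  congr 1
  funext nm' y
  simp only [pvSetCell, setCellN, pvLin, g2, PySem.Int.mod_eq_emod_of_pos hN']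
  rw [show (x : Int) + b * (y : Int) = 1 * (x : Int) + b * (y : Int) from by ring,
    show a * (x : Int) + a * b * (y : Int) + (y : Int)
      = a * (x : Int) + (a * b + 1) * (y : Int) from by ring]

theorem pvPlaceB_eq (matrix : List (List Int)) (P : Mat2) (N w : Nat) (hN : 0 < N) :
    (List.range w).foldl (fun out (x : Nat) =>
      let row := matrix.getD x []
      (List.range N).foldl (fun out (y : Nat) =>
        pvSetCell out (PySem.Int.mod (P.p * (x : Int) + P.q * (y : Int)) (N : Int))
                      (PySem.Int.mod (P.r * (x : Int) + P.s * (y : Int)) (N : Int))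
                      (row.getD y 0)) out) (List.replicate N (List.replicate N 0))
    = pvScatter P N w N matrix := by
  have hN' : (0 : Int) < (N : Int) := by exact_mod_cast hN
  unfold pvScatter pvApplyW
  rw [List.foldl_flatMap]
  congr 1
  funext nm x
  dsimp only
  rw [List.foldl_map]
  congr 1
  funext nm' y
  simp only [pvSetCell, setCellN, pvLin, g2, PySem.Int.mod_eq_emod_of_pos hN']

-- determinants and adjugates under congruence
theorem mdet_mEq {n : Int} {X Y : Mat2} (h : mEq n X Y) : mdet X ≡ mdet Y [ZMOD n] :=
  (h.1.mul h.2.2.2).sub (h.2.1.mul h.2.2.1)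

theorem mEq_madj {n : Int} {X Y : Mat2} (h : mEq n X Y) : mEq n (madj X) (madj Y) :=
  ⟨h.2.2.2, h.2.1.neg, h.2.2.1.neg, h.1⟩

theorem mdet_mpow {M : Mat2} (hdet : mdet M = 1) (k : Nat) : mdet (mpow M k) = 1 := by
  induction k with
  | zero => rfl
  | succ k ih => rw [mpow, mdet_mmul, ih, hdet, one_mul]

-- k+1 iterations of A's step gather by the (k+1)-st power of the adjugate of the step matrix
theorem stepA_iter (matrix : List (List Int)) (a b : Int) (N : Nat) (hN : 0 < N) (k : Nat) :
    (List.range (k + 1)).foldl (fun m _ => pvStepA m a b N N N) matrix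
      = pvGather (mpow (madj ⟨1, b, a, a * b + 1⟩) (k + 1)) N matrix := by
  have hdet : mdet (⟨1, b, a, a * b + 1⟩ : Mat2) = 1 := by simp [mdet]; ring
  have hMG : mEq (N : Int) (mmul ⟨1, b, a, a * b + 1⟩ (madj ⟨1, b, a, a * b + 1⟩)) midM := by
    rw [mmul_madj, hdet]
    exact mEq_refl _ _
  have hGM : mEq (N : Int) (mmul (madj ⟨1, b, a, a * b + 1⟩) ⟨1, b, a, a * b + 1⟩) midM := by
    rw [madj_mmul_self, hdet]
    exact mEq_refl _ _
  induction k with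
  | zero =>
      rw [List.range_one, List.foldl_cons, List.foldl_nil,
        pvStepA_eq_pvScatter _ a b N N hN, pvScatter_eq_pvGather hN hMG hGM]
      rw [show mpow (madj ⟨1, b, a, a * b + 1⟩) 1 = madj ⟨1, b, a, a * b + 1⟩ from by
        simp [mpow, mmul_id_left]]
  | succ k ih =>
      rw [List.range_succ, List.foldl_append, List.foldl_cons, List.foldl_nil, ih,
        pvStepA_eq_pvScatter _ a b N N hN,
        pvScatter_eq_pvGather hN hMG hGM,
        pvGather_comp hN]
      rfl

-- ===== VERDICT (by name: the statement is the Claim_ definition above) =====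
theorem arnold_encode_spec : Claim_equal_arnold_encode := by
  intro matrix a b iterations _ hpre
  obtain ⟨hne, hrest⟩ := hpre
  unfold Spec_arnold_encode arnold_encode arnold_encode_alt
  by_cases hit : iterations ≤ 0
  · rw [if_pos hit]
    rw [show iterations.toNat = 0 from by omega, List.range_zero, List.foldl_nil]
  · rw [if_neg hit]
    rcases hrest with h0 | ⟨hrows, hH, hWH⟩
    · omega
    have hN : 0 < (matrix.headD []).length := hH
    have hN' : (0 : Int) < ((matrix.headD []).length : Int) := by exact_mod_cast hN
    set P : Mat2 := pvPowLoop ⟨1, 0, 0, 1⟩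
        ⟨PySem.Int.mod 1 ((matrix.headD []).length : Int),
         PySem.Int.mod b ((matrix.headD []).length : Int),
         PySem.Int.mod a ((matrix.headD []).length : Int),
         PySem.Int.mod (a * b + 1) ((matrix.headD []).length : Int)⟩
        ((matrix.headD []).length : Int) iterations.toNat with hPdef
    have hM1' : mEq ((matrix.headD []).length : Int)
        ⟨PySem.Int.mod 1 ((matrix.headD []).length : Int),
         PySem.Int.mod b ((matrix.headD []).length : Int),
         PySem.Int.mod a ((matrix.headD []).length : Int),
         PySem.Int.mod (a * b + 1) ((matrix.headD []).length : Int)⟩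
        ⟨1, b, a, a * b + 1⟩ := by
      simp only [mEq, PySem.Int.mod_eq_emod_of_pos hN']
      exact ⟨Int.emod_emod_of_dvd _ dvd_rfl, Int.emod_emod_of_dvd _ dvd_rfl,
             Int.emod_emod_of_dvd _ dvd_rfl, Int.emod_emod_of_dvd _ dvd_rfl⟩
    have hP : mEq ((matrix.headD []).length : Int) P
        (mpow ⟨1, b, a, a * b + 1⟩ iterations.toNat) := by
      rw [hPdef]
      have := pvPowLoop_mEq hN' iterations.toNat ⟨1, 0, 0, 1⟩ _ midM ⟨1, b, a, a * b + 1⟩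
        (mEq_refl _ _) hM1'
      rwa [mmul_id_left] at this
    rw [pvPlaceB_eq matrix P (matrix.headD []).length matrix.length hN]
    by_cases hsq : matrix.length = (matrix.headD []).length
    · -- square case: both sides are gathers by congruent matrix powers
      rw [hsq]
      obtain ⟨k', hk'⟩ : ∃ k', iterations.toNat = k' + 1 := ⟨iterations.toNat - 1, by omega⟩
      rw [hk'] at hP ⊢
      rw [stepA_iter matrix a b (matrix.headD []).length hN k']
      have hdet1 : mdet (⟨1, b, a, a * b + 1⟩ : Mat2) = 1 := by simp [mdet]; ring
      have hdetP : mdet P ≡ 1 [ZMOD ((matrix.headD []).length : Int)] := by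
        have h1 := mdet_mEq hP
        rw [mdet_mpow hdet1 (k' + 1)] at h1
        exact h1
      have hPG : mEq ((matrix.headD []).length : Int) (mmul P (madj P)) midM := by
        rw [mmul_madj]
        exact ⟨hdetP, Int.ModEq.refl _, Int.ModEq.refl _, hdetP⟩
      have hGP : mEq ((matrix.headD []).length : Int) (mmul (madj P) P) midM := by
        rw [madj_mmul_self]
        exact ⟨hdetP, Int.ModEq.refl _, Int.ModEq.refl _, hdetP⟩
      rw [pvScatter_eq_pvGather hN hPG hGP]
      have hadj : mEq ((matrix.headD []).length : Int) (madj P)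
          (mpow (madj ⟨1, b, a, a * b + 1⟩) (k' + 1)) := by
        refine mEq_trans (mEq_madj hP) ?_
        rw [madj_mpow]
        exact mEq_refl _ _
      rw [pvGather_congr hadj]
    · -- one-iteration case: both sides are the same single scatter (any width)
      have hit1 : iterations = 1 := hWH.resolve_right hsq
      rw [show iterations.toNat = 1 from by omega] at hP ⊢
      rw [List.range_one, List.foldl_cons, List.foldl_nil,
        pvStepA_eq_pvScatter matrix a b (matrix.headD []).length matrix.length hN]
      refine (pvScatter_congr ?_ matrix.length (matrix.headD []).length matrix).symm
      refine mEq_trans hP ?_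
      rw [show mpow (⟨1, b, a, a * b + 1⟩ : Mat2) 1 = ⟨1, b, a, a * b + 1⟩ from by
        simp [mpow, mmul_id_left]]
      exact mEq_refl _ _
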